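-- pv_equiv track=rewrite | github.com/melo4/jianzhioffer | 股票的最大利润.py | maxDiff1
-- ===== SOURCE A (Python) =====
-- def maxDiff1(numbers):
--     if not numbers or len(numbers) < 2:
--         return 0
--     minD = numbers[0] # 保存前i-1个数字的最小值
--     maxDiff = numbers[1] - minD
--     for i in range(2, len(numbers)):
--         if numbers[i-1] < minD:
--             minD = numbers[i-1]
--         curDiff = numbers[i] - minD
--         if curDiff > maxDiff:
--             maxDiff = curDiff
--     return maxDiff
-- ===== SOURCE B (Python) =====
-- def maxDiff1(numbers):
--     if len(numbers) < 2:
--         return 0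
--     # suffix-maximum table, built back-to-front: suf[i] = max(numbers[i:])
--     suf = [numbers[-1]]
--     for x in reversed(numbers[:-1]):
--         suf.append(x if x > suf[-1] else suf[-1])
--     suf.reverse()
--     # forward pass: best sale strictly after each buy index
--     diffs = [s - x for x, s in zip(numbers, suf[1:])]
--     best = diffs[0]
--     for d in diffs[1:]:
--         if d > best:
--             best = d
--     return best
-- ===== Notes on version B (the rewrite author's own statement) =====
-- stated objective: alternative
-- what changed: Replaces A's single forward pass tracking a running prefix minimum with a two-phase scheme: a right-to-left pass building a suffix-maximum table, then a forward pass taking the max of suffixMax[i+1]-numbers[i].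
import Mathlib
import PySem

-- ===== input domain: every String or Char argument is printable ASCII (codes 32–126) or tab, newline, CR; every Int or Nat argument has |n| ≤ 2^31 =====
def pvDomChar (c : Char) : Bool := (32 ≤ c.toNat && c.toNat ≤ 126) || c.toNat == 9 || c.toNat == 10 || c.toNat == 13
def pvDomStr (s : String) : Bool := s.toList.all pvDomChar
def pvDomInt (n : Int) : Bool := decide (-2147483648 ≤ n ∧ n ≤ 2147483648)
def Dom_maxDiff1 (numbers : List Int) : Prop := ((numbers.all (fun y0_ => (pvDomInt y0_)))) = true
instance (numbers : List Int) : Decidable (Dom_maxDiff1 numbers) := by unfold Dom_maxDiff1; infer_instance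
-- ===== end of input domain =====

-- B replaces A's forward prefix-minimum pass by a suffix-maximum table plus a forward pass (alternative decomposition, same cost); A is total, so no Pre_.

-- ===== PORT A =====
def maxDiff1 (numbers : List Int) : Int :=
  if numbers = [] ∨ numbers.length < 2 then 0
  else
    let minD := PySem.List.pyGetD numbers 0 0
    let maxDiff := PySem.List.pyGetD numbers 1 0 - minD
    let st := (PySem.List.pyRange 2 (numbers.length : Int) 1).foldl
      (fun (s : Int × Int) i =>
        let minD' := if PySem.List.pyGetD numbers (i - 1) 0 < s.1 then PySem.List.pyGetD numbers (i - 1) 0 else s.1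
        let curDiff := PySem.List.pyGetD numbers i 0 - minD'
        (minD', if curDiff > s.2 then curDiff else s.2)) (minD, maxDiff)
    st.2

-- ===== PORT B =====
def maxDiff1_alt (numbers : List Int) : Int :=
  if numbers.length < 2 then 0
  else
    let last := PySem.List.pyGetD numbers (-1) 0
    -- suf built by appending; modelled with the most recent element at the head, so the final 'suf.reverse()' is the accumulator itself
    let suf := (PySem.List.slice numbers none (some (-1))).reverse.foldl
      (fun acc x => (if x > acc.headD 0 then x else acc.headD 0) :: acc) [last]
    let diffs := (numbers.zip (PySem.List.slice suf (some 1) none)).map (fun p => p.2 - p.1)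
    match diffs with
    | [] => 0  -- unreachable under the guard (diffs is nonempty when len ≥ 2)
    | d :: rest => rest.foldl (fun b d => if d > b then d else b) d

-- ===== PRECONDITION & SPEC =====
def Spec_maxDiff1 (numbers : List Int) (out : Int) : Prop := out = maxDiff1_alt numbers
instance (numbers : List Int) (out : Int) : Decidable (Spec_maxDiff1 numbers out) := by unfold Spec_maxDiff1; infer_instance

-- ===== CLAIM (what is proved, stated in full; the proofs are below) =====
def Claim_equal_maxDiff1 : Prop := ∀ (numbers : List Int), Dom_maxDiff1 numbers → Spec_maxDiff1 numbers (maxDiff1 numbers)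

-- ===== LEMMAS AND PROOFS =====

-- maximum of a nonempty list (0 on [])
def lmax : List Int → Int
  | [] => 0
  | [x] => x
  | x :: y :: t => max x (lmax (y :: t))

-- pm2 x t = max over i<j in (x::t) of elem j - elem i (t nonempty)
def pm2 : Int → List Int → Int
  | _, [] => 0
  | x, [y] => y - x
  | x, y :: z :: t => max (lmax (y :: z :: t) - x) (pm2 y (z :: t))

lemma lmax_cons (x : Int) (l : List Int) (h : l ≠ []) : lmax (x :: l) = max x (lmax l) := by
  cases l with
  | nil => simp at h
  | cons y t => rfl

lemma pm2_cons (x y : Int) (t : List Int) (h : t ≠ []) :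
    pm2 x (y :: t) = max (lmax (y :: t) - x) (pm2 y t) := by
  cases t with
  | nil => simp at h
  | cons z t' => rfl

-- the key prefix-min / suffix-max exchange
lemma pm2_min (c b : Int) (t : List Int) (h : t ≠ []) :
    max (b - c) (pm2 (min c b) t) = pm2 c (b :: t) := by
  cases t with
  | nil => simp at h
  | cons d t'' =>
    cases t'' with
    | nil =>
      simp only [pm2, lmax]
      omega
    | cons e t3 =>
      rw [pm2_cons c b (d :: e :: t3) (by simp), pm2_cons (min c b) d (e :: t3) (by simp),
          pm2_cons b d (e :: t3) (by simp), lmax_cons b (d :: e :: t3) (by simp)]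
      omega

-- A-side: structural version of A's loop (state = (minD, maxDiff), list = prev-element :: rest)
def pf (s : Int × Int) : List Int → Int × Int
  | a :: b :: t =>
      let m' := if a < s.1 then a else s.1
      let c := b - m'
      pf (m', if c > s.2 then c else s.2) (b :: t)
  | _ => s

lemma pf_nil (s : Int × Int) : pf s [] = s := rfl
lemma pf_single (s : Int × Int) (a : Int) : pf s [a] = s := rfl

lemma pf_pm : ∀ (t : List Int) (a m M : Int),
    (pf (m, M) (a :: t)).2 = if t = [] then M else max M (pm2 (min m a) t) := by
  intro t
  induction t with
  | nil => intro a m M; simp [pf_single]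
  | cons b t' ih =>
    intro a m M
    show (pf (if a < m then a else m, if b - (if a < m then a else m) > M then b - (if a < m then a else m) else M) (b :: t')).2 = _
    have hmin : (if a < m then a else m) = min m a := by omega
    rw [hmin]
    have hmax : (if b - min m a > M then b - min m a else M) = max M (b - min m a) := by omega
    rw [hmax, ih b (min m a) (max M (b - min m a))]
    cases t' with
    | nil => simp [pm2]
    | cons d t'' =>
      have hkey : max (b - min m a) (pm2 (min (min m a) b) (d :: t'')) = pm2 (min m a) (b :: d :: t'') :=
        pm2_min (min m a) b (d :: t'') (by simp)
      rw [if_neg (show ¬ (d :: t'' = []) by simp), if_neg (show ¬ (b :: d :: t'' = []) by simp)]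
      omega

-- bridge: A's fold over range(k+1, len) equals pf on drop k
lemma foldA (xs : List Int) : ∀ (n k : Nat), 1 ≤ k → xs.length ≤ k + n → ∀ (s : Int × Int),
    (PySem.List.pyRange ((k : Int) + 1) (xs.length : Int) 1).foldl
      (fun (s : Int × Int) i =>
        let minD' := if PySem.List.pyGetD xs (i - 1) 0 < s.1 then PySem.List.pyGetD xs (i - 1) 0 else s.1
        let curDiff := PySem.List.pyGetD xs i 0 - minD'
        (minD', if curDiff > s.2 then curDiff else s.2)) s
    = pf s (xs.drop k) := by
  intro n
  induction n with
  | zero =>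
    intro k hk hlen s
    have hr : PySem.List.pyRange ((k : Int) + 1) (xs.length : Int) 1 = [] := by
      rw [PySem.List.pyRange_one]
      have : ((xs.length : Int) - ((k : Int) + 1)).toNat = 0 := by omega
      simp [this]
    have hd : xs.drop k = [] := List.drop_eq_nil_of_le (by omega)
    rw [hr, hd, pf_nil]
    rfl
  | succ n ih =>
    intro k hk hlen s
    by_cases hlt : k + 1 < xs.length
    · have hcons : PySem.List.pyRange ((k : Int) + 1) (xs.length : Int) 1
          = ((k : Int) + 1) :: PySem.List.pyRange ((k : Int) + 1 + 1) (xs.length : Int) 1 :=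
        PySem.List.pyRange_one_cons (by omega)
      rw [hcons, List.foldl_cons]
      have e1 : ((k : Int) + 1 - 1) = ((k : Int)) := by omega
      have e2 : ((k : Int) + 1) = ((k + 1 : Nat) : Int) := by omega
      have g1 : PySem.List.pyGetD xs ((k : Int)) 0 = xs.getD k 0 := PySem.List.pyGetD_natCast xs k 0
      have g2 : PySem.List.pyGetD xs (((k + 1 : Nat) : Int)) 0 = xs.getD (k + 1) 0 :=
        PySem.List.pyGetD_natCast xs (k + 1) 0
      rw [e1, e2, ih (k + 1) (by omega) (by omega)]
      have hd1 : xs.drop k = xs[k] :: xs.drop (k + 1) := List.drop_eq_getElem_cons (by omega)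
      have hd2 : xs.drop (k + 1) = xs[k + 1] :: xs.drop (k + 2) := List.drop_eq_getElem_cons (by omega)
      have gk : xs.getD k 0 = xs[k] := List.getD_eq_getElem xs 0 (by omega)
      have gk1 : xs.getD (k + 1) 0 = xs[k + 1] := List.getD_eq_getElem xs 0 (by omega)
      rw [hd1, hd2]
      show pf _ (xs[k + 1] :: xs.drop (k + 2)) = pf _ (xs[k + 1] :: xs.drop (k + 2))
      rw [g1, g2, gk, gk1]
    · have hr : PySem.List.pyRange ((k : Int) + 1) (xs.length : Int) 1 = [] := by
        rw [PySem.List.pyRange_one]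
        have : ((xs.length : Int) - ((k : Int) + 1)).toNat = 0 := by omega
        simp [this]
      rw [hr]
      cases hd : xs.drop k with
      | nil => rw [pf_nil]; rfl
      | cons a t =>
        have h2 : (xs.drop k).length = xs.length - k := List.length_drop
        rw [hd] at h2
        have ht : t = [] := by
          cases t with
          | nil => rfl
          | cons b u => simp at h2; omega
        rw [ht, pf_single]
        rfl

-- A equals pm2
lemma A_eq (x y : Int) (t : List Int) : maxDiff1 (x :: y :: t) = (if t = [] then y - x else max (y - x) (pm2 (min x y) t)) := by
  unfold maxDiff1
  rw [if_neg (by simp)]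
  simp only []
  have h := foldA (x :: y :: t) (x :: y :: t).length 1 (by omega) (by omega)
    (PySem.List.pyGetD (x :: y :: t) 0 0, PySem.List.pyGetD (x :: y :: t) 1 0 - PySem.List.pyGetD (x :: y :: t) 0 0)
  have g0 : PySem.List.pyGetD (x :: y :: t) (0 : Int) 0 = x := by
    simp [PySem.List.pyGetD]
  have g1 : PySem.List.pyGetD (x :: y :: t) (1 : Int) 0 = y := by
    simp [PySem.List.pyGetD]
  have e2 : ((1 : Nat) : Int) + 1 = (2 : Int) := by norm_num
  rw [e2] at h
  rw [g0, g1] at h ⊢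
  rw [show (x :: y :: t).drop 1 = y :: t from rfl] at h
  rw [h, pf_pm t y x (y - x)]

-- B-side: the suffix-maximum table
def sufAll : List Int → List Int
  | [] => []
  | x :: t => lmax (x :: t) :: sufAll t

lemma sufAll_head (l : List Int) (h : l ≠ []) : (sufAll l).headD 0 = lmax l := by
  cases l with
  | nil => simp at h
  | cons x t => rfl

lemma suf_build (z : Int) : ∀ (ys : List Int),
    ys.foldr (fun x acc => (if x > acc.headD 0 then x else acc.headD 0) :: acc) [z] = sufAll (ys ++ [z]) := by
  intro ys
  induction ys with
  | nil => simp [sufAll, lmax]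
  | cons y ys ih =>
    rw [List.foldr_cons, ih]
    have hne : ys ++ [z] ≠ [] := by simp
    rw [sufAll_head (ys ++ [z]) hne]
    show _ :: sufAll (ys ++ [z]) = lmax (y :: (ys ++ [z])) :: sufAll (ys ++ [z])
    rw [lmax_cons y (ys ++ [z]) hne]
    congr 1
    omega

lemma sufAll_tail (l : List Int) : (sufAll l).tail = sufAll l.tail := by
  cases l with
  | nil => rfl
  | cons x t => rfl

-- the forward-pass diffs
lemma fold_if_max : ∀ (l : List Int) (b : Int),
    l.foldl (fun b d => if d > b then d else b) b = if l = [] then b else max b (lmax l) := by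
  intro l
  induction l with
  | nil => intro b; rfl
  | cons d l' ih =>
    intro b
    rw [List.foldl_cons, ih]
    cases l' with
    | nil => simp [lmax]; omega
    | cons e t =>
      rw [lmax_cons d (e :: t) (by simp)]
      simp only [if_neg (show ¬ (e :: t = []) by simp), if_neg (show ¬ (d :: e :: t = []) by simp)]
      omega

lemma diffs_pm : ∀ (t : List Int) (x : Int), t ≠ [] →
    lmax (((x :: t).zip (sufAll t)).map (fun p => p.2 - p.1)) = pm2 x t := by
  intro t
  induction t with
  | nil => intro x h; simp at h
  | cons y t' ih =>
    intro x _
    cases t' with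
    | nil => simp [sufAll, lmax, pm2]
    | cons z t'' =>
      have hz : ((x :: y :: z :: t'').zip (sufAll (y :: z :: t''))).map (fun p => p.2 - p.1)
          = (lmax (y :: z :: t'') - x) :: ((y :: z :: t'').zip (sufAll (z :: t''))).map (fun p => p.2 - p.1) := by
        simp [sufAll]
      rw [hz]
      have hnz : ((y :: z :: t'').zip (sufAll (z :: t''))).map (fun p : Int × Int => p.2 - p.1) ≠ [] := by
        simp [sufAll]
      rw [lmax_cons _ _ hnz, ih y (by simp), pm2_cons x y (z :: t'') (by simp)]

-- B equals pm2
lemma B_eq (x y : Int) (t : List Int) : maxDiff1_alt (x :: y :: t) = pm2 x (y :: t) := by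
  unfold maxDiff1_alt
  rw [if_neg (by simp)]
  simp only []
  have hne : (x :: y :: t) ≠ [] := by simp
  have hlast : PySem.List.pyGetD (x :: y :: t) (-1) 0 = (x :: y :: t).getLast hne :=
    PySem.List.pyGetD_neg_one (x :: y :: t) 0 hne
  have hsl : PySem.List.slice (x :: y :: t) none (some (-1)) = (x :: y :: t).dropLast :=
    PySem.List.slice_to_neg_one (x :: y :: t)
  rw [hlast, hsl, List.foldl_reverse]
  have hfold : (x :: y :: t).dropLast.foldr
      (fun x acc => (if x > acc.headD 0 then x else acc.headD 0) :: acc) [(x :: y :: t).getLast hne]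
      = sufAll ((x :: y :: t).dropLast ++ [(x :: y :: t).getLast hne]) := by
    have := suf_build ((x :: y :: t).getLast hne) (x :: y :: t).dropLast
    convert this using 2
  rw [hfold, List.dropLast_append_getLast hne]
  rw [PySem.List.slice_from_one]
  rw [sufAll_tail]
  have hd : ((x :: y :: t).zip (sufAll (y :: t))).map (fun p => p.2 - p.1)
      = (lmax (y :: t) - x) :: ((y :: t).zip (sufAll t)).map (fun p => p.2 - p.1) := by
    simp [sufAll]
  rw [show ((x :: y :: t) : List Int).tail = y :: t from rfl, hd]
  show (((y :: t).zip (sufAll t)).map (fun p => p.2 - p.1)).foldl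
      (fun b d => if d > b then d else b) (lmax (y :: t) - x) = pm2 x (y :: t)
  rw [fold_if_max]
  cases t with
  | nil => simp [sufAll, lmax, pm2]
  | cons z t' =>
    have hnz : ((y :: z :: t').zip (sufAll (z :: t'))).map (fun p : Int × Int => p.2 - p.1) ≠ [] := by
      simp [sufAll]
    rw [if_neg hnz, diffs_pm (z :: t') y (by simp), pm2_cons x y (z :: t') (by simp)]

-- ===== VERDICT (by name: the statement is the Claim_ definition above) =====
theorem maxDiff1_spec : Claim_equal_maxDiff1 := by
  intro numbers _
  unfold Spec_maxDiff1
  match numbers with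
  | [] => rfl
  | [x] => rfl
  | x :: y :: t =>
    rw [A_eq, B_eq]
    cases t with
    | nil => simp [pm2]
    | cons z t' =>
      rw [if_neg (show ¬ (z :: t' = []) by simp)]
      exact pm2_min x y (z :: t') (by simp)
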